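-- pv_equiv track=rewrite | github.com/fasiluva/Reversi | python/jugadas.py | generaVertical
-- ===== SOURCE A (Python) =====
-- def generaVertical(fichaVerifica, fichasJugador, fichasMaquina, turno):
--
--     # generaVertical :: (int, int) set((int, int)) set((int, int)) string -> bool
--     # Analiza si la ficha genera cambios verticalmente, hacia arriba o hacia abajo.
--     # En caso de hacerlo en algun sentido, devuelve True.
--
--     if turno == "jugador":
--
--         contadorFila = fichaVerifica[1] - 1
--
--         while contadorFila >= 1 and (fichaVerifica[0], contadorFila) in fichasMaquina:
--
--             if (fichaVerifica[0], contadorFila - 1) in fichasJugador: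
--
--                 return True
--
--             contadorFila -= 1
--
--
--         contadorFila = fichaVerifica[1] + 1
--
--         while contadorFila <= 8 and (fichaVerifica[0], contadorFila) in fichasMaquina:
--
--             if (fichaVerifica[0], contadorFila + 1) in fichasJugador:
--
--                 return True
--
--             contadorFila += 1
--
--         return False
--
--     else:
--
--         contadorFila = fichaVerifica[1] - 1
--
--         while contadorFila >= 1 and (fichaVerifica[0], contadorFila) in fichasJugador:
--
--             if (fichaVerifica[0], contadorFila - 1) in fichasMaquina:
--
--                 return True
--
--             contadorFila -= 1
--
--
--         contadorFila = fichaVerifica[1] + 1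
--
--         while contadorFila <= 8 and (fichaVerifica[0], contadorFila) in fichasJugador:
--
--             if (fichaVerifica[0], contadorFila + 1) in fichasMaquina:
--
--                 return True
--
--             contadorFila += 1
--
--         return False
-- ===== SOURCE B (Python) =====
-- def generaVertical(fichaVerifica, fichasJugador, fichasMaquina, turno):
--     # Two-phase per direction: first measure the run of rival pieces adjacent
--     # to the placed piece, then scan that stretch for an own piece one past it.
--     col, fila = fichaVerifica
--     if turno == "jugador":
--         propias, rival = fichasJugador, fichasMaquina
--     else:
--         propias, rival = fichasMaquina, fichasJugador
--
--     m = 0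
--     while fila - 1 - m >= 1 and (col, fila - 1 - m) in rival:
--         m += 1
--     if any((col, fila - 2 - k) in propias for k in range(m)):
--         return True
--
--     m = 0
--     while fila + 1 + m <= 8 and (col, fila + 1 + m) in rival:
--         m += 1
--     return any((col, fila + 2 + k) in propias for k in range(m))
-- ===== Notes on version B (the rewrite author's own statement) =====
-- stated objective: simpler
-- what changed: A's four interleaved walk-loops with early returns are replaced by a two-phase scheme per direction: first measure the adjacent rival run length, then scan that stretch for an own piece one past each rival cell; the turn branch collapses to one (propias, rival) selection.
import Mathlib
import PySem

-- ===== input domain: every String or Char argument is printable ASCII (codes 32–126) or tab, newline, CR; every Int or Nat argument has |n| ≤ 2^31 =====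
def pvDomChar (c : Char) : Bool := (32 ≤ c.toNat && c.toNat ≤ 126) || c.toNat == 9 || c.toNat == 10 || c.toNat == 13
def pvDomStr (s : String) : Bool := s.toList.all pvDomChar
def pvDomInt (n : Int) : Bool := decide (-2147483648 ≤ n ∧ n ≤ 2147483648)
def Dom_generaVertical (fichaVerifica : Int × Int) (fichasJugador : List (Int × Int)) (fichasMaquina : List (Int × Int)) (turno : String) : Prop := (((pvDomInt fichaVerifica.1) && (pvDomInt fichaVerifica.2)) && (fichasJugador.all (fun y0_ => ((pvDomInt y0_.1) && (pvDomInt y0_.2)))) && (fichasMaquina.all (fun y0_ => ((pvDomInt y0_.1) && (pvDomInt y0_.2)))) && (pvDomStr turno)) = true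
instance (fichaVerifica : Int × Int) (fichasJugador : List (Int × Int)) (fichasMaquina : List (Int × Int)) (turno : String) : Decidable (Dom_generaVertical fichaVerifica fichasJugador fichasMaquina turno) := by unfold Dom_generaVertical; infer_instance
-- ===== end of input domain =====

-- ===== PORT A =====
-- Header: B replaces A's four interleaved walk-with-early-return loops by a two-phase
-- scheme per direction (measure the rival run, then scan it for an own piece); simpler decomposition.

-- downward while-loop of A: walk while row >= 1 and cell is rival, early-return when own piece one below
def loopDownA (col : Int) (f : Int) (rival : List (Int × Int)) (propias : List (Int × Int)) : Bool :=
  if 1 ≤ f ∧ (col, f) ∈ rival then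
    if (col, f - 1) ∈ propias then true
    else loopDownA col (f - 1) rival propias
  else false
termination_by f.toNat
decreasing_by omega

-- upward while-loop of A: walk while row <= 8 and cell is rival, early-return when own piece one above
def loopUpA (col : Int) (f : Int) (rival : List (Int × Int)) (propias : List (Int × Int)) : Bool :=
  if f ≤ 8 ∧ (col, f) ∈ rival then
    if (col, f + 1) ∈ propias then true
    else loopUpA col (f + 1) rival propias
  else false
termination_by (9 - f).toNat
decreasing_by omega

def generaVertical (fichaVerifica : Int × Int) (fichasJugador : List (Int × Int)) (fichasMaquina : List (Int × Int)) (turno : String) : Bool :=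
  if turno == "jugador" then
    if loopDownA fichaVerifica.1 (fichaVerifica.2 - 1) fichasMaquina fichasJugador then true
    else loopUpA fichaVerifica.1 (fichaVerifica.2 + 1) fichasMaquina fichasJugador
  else
    if loopDownA fichaVerifica.1 (fichaVerifica.2 - 1) fichasJugador fichasMaquina then true
    else loopUpA fichaVerifica.1 (fichaVerifica.2 + 1) fichasJugador fichasMaquina

-- ===== PORT B =====
-- B: length of the downward run of rival pieces starting at row f
def runDownB (col : Int) (f : Int) (rival : List (Int × Int)) : Nat :=
  if 1 ≤ f ∧ (col, f) ∈ rival then 1 + runDownB col (f - 1) rival else 0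
termination_by f.toNat
decreasing_by omega

-- B: length of the upward run of rival pieces starting at row f
def runUpB (col : Int) (f : Int) (rival : List (Int × Int)) : Nat :=
  if f ≤ 8 ∧ (col, f) ∈ rival then 1 + runUpB col (f + 1) rival else 0
termination_by (9 - f).toNat
decreasing_by omega

def generaVertical_alt (fichaVerifica : Int × Int) (fichasJugador : List (Int × Int)) (fichasMaquina : List (Int × Int)) (turno : String) : Bool :=
  let col := fichaVerifica.1
  let fila := fichaVerifica.2
  let pr := if turno == "jugador" then (fichasJugador, fichasMaquina) else (fichasMaquina, fichasJugador)
  let propias := pr.1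
  let rival := pr.2
  if (List.range (runDownB col (fila - 1) rival)).any
      (fun k => decide ((col, fila - 2 - (k : Int)) ∈ propias)) then true
  else
    (List.range (runUpB col (fila + 1) rival)).any
      (fun k => decide ((col, fila + 2 + (k : Int)) ∈ propias))

-- ===== PRECONDITION & SPEC =====
def Spec_generaVertical (fichaVerifica : Int × Int) (fichasJugador : List (Int × Int)) (fichasMaquina : List (Int × Int)) (turno : String) (out : Bool) : Prop := out = generaVertical_alt fichaVerifica fichasJugador fichasMaquina turno
instance (fichaVerifica : Int × Int) (fichasJugador : List (Int × Int)) (fichasMaquina : List (Int × Int)) (turno : String) (out : Bool) : Decidable (Spec_generaVertical fichaVerifica fichasJugador fichasMaquina turno out) := by unfold Spec_generaVertical; infer_instance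

-- ===== CLAIM (what is proved, stated in full; the proofs are below) =====
def Claim_equal_generaVertical : Prop := ∀ (fichaVerifica : Int × Int) (fichasJugador : List (Int × Int)) (fichasMaquina : List (Int × Int)) (turno : String), Dom_generaVertical fichaVerifica fichasJugador fichasMaquina turno → Spec_generaVertical fichaVerifica fichasJugador fichasMaquina turno (generaVertical fichaVerifica fichasJugador fichasMaquina turno)

-- ===== LEMMAS AND PROOFS =====
theorem down_eq (col f : Int) (rival propias : List (Int × Int)) :
    loopDownA col f rival propias =
    (List.range (runDownB col f rival)).any
      (fun k => decide ((col, f - 1 - (k : Int)) ∈ propias)) := by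
  fun_induction loopDownA col f rival propias with
  | case1 f h hp =>
    rw [runDownB, if_pos h, Nat.add_comm]
    simp [List.range_succ_eq_map, hp]
  | case2 f h hp ih =>
    rw [runDownB, if_pos h, Nat.add_comm, List.range_succ_eq_map]
    have hsh : ∀ k : ℕ, f - 1 - (↑(k + 1) : ℤ) = f - 1 - 1 - ↑k := by intro k; push_cast; ring
    simp only [List.any_cons, List.any_map, Function.comp_def, hsh, ih]
    simp [hp]
  | case3 f h =>
    rw [runDownB, if_neg h]
    simp

theorem up_eq (col f : Int) (rival propias : List (Int × Int)) :
    loopUpA col f rival propias =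
    (List.range (runUpB col f rival)).any
      (fun k => decide ((col, f + 1 + (k : Int)) ∈ propias)) := by
  fun_induction loopUpA col f rival propias with
  | case1 f h hp =>
    rw [runUpB, if_pos h, Nat.add_comm]
    simp [List.range_succ_eq_map, hp]
  | case2 f h hp ih =>
    rw [runUpB, if_pos h, Nat.add_comm, List.range_succ_eq_map]
    have hsh : ∀ k : ℕ, f + 1 + (↑(k + 1) : ℤ) = f + 1 + 1 + ↑k := by intro k; push_cast; ring
    simp only [List.any_cons, List.any_map, Function.comp_def, hsh, ih]
    simp [hp]
  | case3 f h =>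
    rw [runUpB, if_neg h]
    simp

theorem gv_eq (fv : Int × Int) (J M : List (Int × Int)) (t : String) :
    generaVertical fv J M t = generaVertical_alt fv J M t := by
  have hd : ∀ k : ℕ, fv.2 - 1 - 1 - (k : ℤ) = fv.2 - 2 - (k : ℤ) := by intro k; ring
  have hu : ∀ k : ℕ, fv.2 + 1 + 1 + (k : ℤ) = fv.2 + 2 + (k : ℤ) := by intro k; ring
  unfold generaVertical generaVertical_alt
  by_cases h : t == "jugador" <;>
    simp only [h, if_pos, Bool.false_eq_true, ite_false, down_eq, up_eq, hd, hu]

-- ===== VERDICT (by name: the statement is the Claim_ definition above) =====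
theorem generaVertical_spec : Claim_equal_generaVertical := by
  intro fv J M t _
  exact gv_eq fv J M t
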